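-- pv_equiv track=rewrite | github.com/bartlomiejolma/dbt-airflow-factory | dbt_airflow_factory/tasks_builder/utils.py | transform_cron_expression
-- ===== SOURCE A (Python) =====
-- def transform_cron_expression(cron_expr: str) -> str:
--     """
--     This function accepts a string `cron_expr` and returns another string. The `cron_expr` string
--     represents a cron schedule. It splits the `cron_expr` into components and transforms each
--     component by replacing any `,` in it with `-`. It then joins the transformed components
--     with `_` and replaces any `*` with `x`.
--
--     Args:
--         cron_expr (str): A string representing a cron schedule.
--
--     Returns:
--         str: A transformed string representing a cron schedule.
--
--     """
--     components = cron_expr.split()  # split the cron expression into its components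
--     transformed_components = []
--     for component in components:
--         # iterate through each component and transform it by replacing , with -
--         transformed_component = "-".join(val for val in component.split(",") if val)
--         transformed_components.append(transformed_component)
--     # join all the transformed components with "_" and replace any "*" with "x"
--     new_expr = "_".join(transformed_components).replace("*", "x")
--     return new_expr
-- ===== SOURCE B (Python) =====
-- def transform_cron_expression(cron_expr: str) -> str:
--     # One-pass state machine over the characters instead of split/filter/join passes.
--     out = []
--     seen = in_token = piece = pending = False
--     for c in cron_expr:
--         if c.isspace():
--             in_token = False
--         else:
--             if not in_token:
--                 if seen:
--                     out.append("_")
--                 seen = True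
--                 in_token = True
--                 piece = False
--                 pending = False
--             if c == ",":
--                 pending = True
--             else:
--                 if pending and piece:
--                     out.append("-")
--                 pending = False
--                 out.append("x" if c == "*" else c)
--                 piece = True
--     return "".join(out)
-- ===== Notes on version B (the rewrite author's own statement) =====
-- stated objective: alternative
-- what changed: Replaces A's multi-pass pipeline (whitespace split, per-component comma split + filter + join, underscore join, final '*'-replace pass) with a single left-to-right character scan driven by a small state machine (seen/in_token/piece/pending flags) that emits the output directly.
import Mathlib
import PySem

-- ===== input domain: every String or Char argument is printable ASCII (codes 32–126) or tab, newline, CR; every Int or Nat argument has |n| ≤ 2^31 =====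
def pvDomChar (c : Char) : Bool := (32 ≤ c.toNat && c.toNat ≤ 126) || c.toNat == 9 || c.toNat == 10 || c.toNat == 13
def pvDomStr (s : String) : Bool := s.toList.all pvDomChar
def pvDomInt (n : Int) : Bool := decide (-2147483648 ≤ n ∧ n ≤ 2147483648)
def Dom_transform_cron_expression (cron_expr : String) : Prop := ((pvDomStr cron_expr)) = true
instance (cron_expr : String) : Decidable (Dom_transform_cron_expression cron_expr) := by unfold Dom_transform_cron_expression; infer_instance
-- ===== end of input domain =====

-- B replaces A's split/filter/join passes by a single-pass character state machine; objective: alternative (one pass, same cost class).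

-- ===== PORT A =====
-- "-".join(val for val in component.split(",") if val)
def pvTcompA (comp : List Char) : List Char :=
  PySem.Chars.join ['-'] ((PySem.Chars.splitOn comp [',']).filter (fun v => v ≠ []))

def transform_cron_expression (cron_expr : String) : String :=
  let components := PySem.Chars.split₀ cron_expr.toList
  let transformed_components := components.map pvTcompA
  String.ofList (PySem.Chars.replace (PySem.Chars.join ['_'] transformed_components) ['*'] ['x'])

-- ===== PORT B =====
-- state: (out, seen, in_token, piece, pending), exactly B's loop body
def pvStep (st : List Char × Bool × Bool × Bool × Bool) (c : Char) : List Char × Bool × Bool × Bool × Bool :=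
  match st with
  | (out, seen, inTok, piece, pending) =>
    if PySem.Chars.isspace c then (out, seen, false, piece, pending)
    else
      let out := if !inTok && seen then out ++ ['_'] else out
      let seen := if !inTok then true else seen
      let piece := if !inTok then false else piece
      let pending := if !inTok then false else pending
      if c = ',' then (out, seen, true, piece, true)
      else (out ++ (if pending && piece then ['-'] else []) ++ [if c = '*' then 'x' else c], seen, true, true, false)

def transform_cron_expression_alt (cron_expr : String) : String :=
  String.ofList (cron_expr.toList.foldl pvStep ([], false, false, false, false)).1

-- ===== PRECONDITION & SPEC =====
def Spec_transform_cron_expression (cron_expr : String) (out : String) : Prop := out = transform_cron_expression_alt cron_expr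
instance (cron_expr : String) (out : String) : Decidable (Spec_transform_cron_expression cron_expr out) := by unfold Spec_transform_cron_expression; infer_instance

-- ===== CLAIM (what is proved, stated in full; the proofs are below) =====
def Claim_equal_transform_cron_expression : Prop := ∀ (cron_expr : String), Dom_transform_cron_expression cron_expr → Spec_transform_cron_expression cron_expr (transform_cron_expression cron_expr)

-- ===== LEMMAS AND PROOFS =====

-- '*' → 'x' on one char
def pvStar (c : Char) : Char := if c = '*' then 'x' else c

-- whitespace split (A's cron_expr.split()) as a plain recursion
def pvWsplit (cur : List Char) : List Char → List (List Char)
  | [] => if cur.isEmpty then [] else [cur.reverse]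
  | c :: r =>
    if PySem.Chars.isspace c then
      if cur.isEmpty then pvWsplit [] r else cur.reverse :: pvWsplit [] r
    else pvWsplit (c :: cur) r

-- comma split (A's component.split(",")) as a plain recursion
def pvCsplit (cur : List Char) : List Char → List (List Char)
  | [] => [cur.reverse]
  | c :: r => if c = ',' then cur.reverse :: pvCsplit [] r else pvCsplit (c :: cur) r

-- B's emission while inside one token (no whitespace in t)
def pvEmitTok (p q : Bool) : List Char → List Char
  | [] => []
  | c :: r =>
    if c = ',' then pvEmitTok p true r
    else (if q && p then ['-'] else []) ++ [pvStar c] ++ pvEmitTok true false r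

-- B's state machine as a structural recursion (foldl bridged below)
def pvFsm (seen inTok piece pending : Bool) : List Char → List Char
  | [] => []
  | c :: r =>
    if PySem.Chars.isspace c then pvFsm seen false piece pending r
    else
      let e1 := if !inTok && seen then ['_'] else []
      let seen' := if !inTok then true else seen
      let piece' := if !inTok then false else piece
      let pending' := if !inTok then false else pending
      if c = ',' then e1 ++ pvFsm seen' true piece' true r
      else e1 ++ (if pending' && piece' then ['-'] else []) ++ [if c = '*' then 'x' else c] ++ pvFsm seen' true true false r

-- '_'-joining with a leading separator when a token was already emitted
def pvJt (seen : Bool) : List (List Char) → List Char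
  | [] => []
  | t :: ts => (if seen then ['_'] else []) ++ pvEmitTok false false t ++ pvJt true ts

def pvHasChar (t : List Char) : Bool := t.any (fun c => c ≠ ',')
def pvHeadComma : List Char → Bool
  | ',' :: _ => true
  | _ => false

theorem pv_intercalate_dash (x : List Char) (xs : List (List Char)) :
    List.intercalate ['-'] (x :: xs) = x ++ xs.flatMap (fun y => '-' :: y) := by
  induction xs generalizing x with
  | nil => simp [List.intercalate]
  | cons y ys ih => simp [List.intercalate, List.intersperse] at *; simp [ih]

theorem pv_intercalate_us (x : List Char) (xs : List (List Char)) :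
    List.intercalate ['_'] (x :: xs) = x ++ xs.flatMap (fun y => '_' :: y) := by
  induction xs generalizing x with
  | nil => simp [List.intercalate]
  | cons y ys ih => simp [List.intercalate, List.intersperse] at *; simp [ih]

theorem pv_split₀_go (cs : List Char) : ∀ cur acc,
    PySem.Chars.split₀.go cs cur acc = acc.reverse ++ pvWsplit cur cs := by
  induction cs with
  | nil => intro cur acc; simp [PySem.Chars.split₀.go, pvWsplit]; split_ifs <;> simp
  | cons c r ih =>
    intro cur acc
    simp only [PySem.Chars.split₀.go, pvWsplit]
    split_ifs with h1 h2 <;> simp [ih]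

theorem pv_split₀_eq (cs : List Char) : PySem.Chars.split₀ cs = pvWsplit [] cs := by
  simpa using pv_split₀_go cs [] []

theorem pv_splitOn_go (fuel : Nat) : ∀ l cur acc, l.length < fuel →
    PySem.Chars.splitOn.go [','] fuel l cur acc = acc.reverse ++ pvCsplit cur l := by
  induction fuel with
  | zero => intro l cur acc h; omega
  | succ n ih =>
    intro l cur acc h
    match l with
    | [] => rw [PySem.Chars.splitOn.go.eq_def]; simp [pvCsplit]
    | c :: r =>
      simp only [PySem.Chars.splitOn.go, pvCsplit]
      by_cases hc : c = ','
      · subst hc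
        rw [if_pos (by simp [List.isPrefixOf])]
        rw [if_pos rfl]
        simp only [List.length_cons, List.length_nil, List.drop_succ_cons, List.drop_zero]
        rw [ih r [] (cur.reverse :: acc) (by simpa using Nat.lt_of_succ_lt_succ h)]
        simp
      · rw [if_neg (by simp [List.isPrefixOf]; exact fun hh => hc hh.symm)]
        rw [if_neg hc]
        exact ih r (c :: cur) acc (by simpa using Nat.lt_of_succ_lt_succ h)

theorem pv_splitOn_eq (t : List Char) : PySem.Chars.splitOn t [','] = pvCsplit [] t := by
  simpa using pv_splitOn_go (t.length + 1) t [] [] (by omega)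

theorem pv_replace_go (fuel : Nat) : ∀ s acc, s.length ≤ fuel →
    PySem.Chars.replace.go ['*'] ['x'] fuel s acc = acc.reverse ++ s.map pvStar := by
  induction fuel with
  | zero =>
    intro s acc h
    have : s = [] := List.eq_nil_of_length_eq_zero (Nat.le_zero.mp h)
    subst this; simp [PySem.Chars.replace.go]
  | succ n ih =>
    intro s acc h
    match s with
    | [] => simp [PySem.Chars.replace.go]
    | c :: r =>
      simp only [PySem.Chars.replace.go]
      by_cases hc : c = '*'
      · subst hc
        rw [if_pos (by simp [List.isPrefixOf])]
        simp only [List.length_cons, List.length_nil, List.drop_succ_cons, List.drop_zero]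
        rw [ih r _ (by simpa using Nat.le_of_succ_le_succ h)]
        simp [pvStar]
      · rw [if_neg (by simp [List.isPrefixOf]; exact fun hh => hc hh.symm)]
        rw [ih r _ (by simpa using Nat.le_of_succ_le_succ h)]
        simp [pvStar, hc]

theorem pv_replace_eq (s : List Char) :
    PySem.Chars.replace s ['*'] ['x'] = s.map pvStar := by
  simp only [PySem.Chars.replace]
  rw [if_neg (by simp)]
  simpa using pv_replace_go s.length s [] (le_refl _)

-- csplit with a nonempty accumulator prepends into the head piece
theorem pv_csplit_cur (r : List Char) : ∀ cur,
    pvCsplit cur r = (cur.reverse ++ (pvCsplit [] r).headI) :: (pvCsplit [] r).tail := by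
  induction r with
  | nil => intro cur; simp [pvCsplit]
  | cons c r ih =>
    intro cur
    by_cases hc : c = ','
    · subst hc; simp [pvCsplit]
    · simp only [pvCsplit, if_neg hc]
      rw [ih (c :: cur), ih [c]]
      simp

theorem pv_csplit_ne (r : List Char) : pvCsplit [] r ≠ [] := by
  cases r with
  | nil => simp [pvCsplit]
  | cons c r =>
    by_cases hc : c = ','
    · subst hc; simp [pvCsplit]
    · simp only [pvCsplit, if_neg hc]; rw [pv_csplit_cur]; simp

-- hasChar ↔ some nonempty comma piece
theorem pv_hasChar_filter (t : List Char) :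
    pvHasChar t = !((pvCsplit [] t).filter (fun v => v ≠ [])).isEmpty := by
  induction t with
  | nil => simp [pvHasChar, pvCsplit]
  | cons c r ih =>
    by_cases hc : c = ','
    · subst hc; simp [pvHasChar, pvCsplit] at *; simpa using ih
    · simp only [pvCsplit, if_neg hc]
      rw [pv_csplit_cur]
      simp [pvHasChar, hc]

-- a dash is pending across the start of a piece iff p & a char follows & (q or a comma first)
theorem pv_emitTok_pending (t : List Char) : ∀ p q,
    pvEmitTok p q t =
      (if p && pvHasChar t && (q || pvHeadComma t) then ['-'] else []) ++ pvEmitTok false false t := by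
  induction t with
  | nil => intro p q; simp [pvEmitTok, pvHasChar]
  | cons c r ih =>
    intro p q
    by_cases hc : c = ','
    · subst hc
      simp only [pvEmitTok]
      rw [ih p true, ih false true]
      simp [pvHasChar, pvHeadComma]
    · simp only [pvEmitTok, if_neg hc]
      simp [pvHasChar, pvHeadComma, hc, and_comm]

-- the head piece of pvCsplit [] r is empty iff r is empty or starts with a comma
theorem pv_csplit_head_nil (r : List Char) (h : (pvCsplit [] r).headI = []) :
    r = [] ∨ pvHeadComma r = true := by
  cases r with
  | nil => left; rfl
  | cons c r =>
    by_cases hc : c = ','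
    · subst hc; right; rfl
    · exfalso
      simp only [pvCsplit, if_neg hc] at h
      rw [pv_csplit_cur] at h
      simp at h

theorem pv_csplit_head_cons (c : Char) (r : List Char) (hc : c ≠ ',') :
    pvCsplit [] (c :: r) = (c :: (pvCsplit [] r).headI) :: (pvCsplit [] r).tail := by
  simp only [pvCsplit, if_neg hc]
  rw [pv_csplit_cur]
  simp

-- core token emission = star-mapped "-".join of the nonempty comma pieces
theorem pv_core_eq (t : List Char) :
    pvEmitTok false false t =
      (List.intercalate ['-'] ((pvCsplit [] t).filter (fun v => v ≠ []))).map pvStar := by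
  induction t with
  | nil => simp [pvEmitTok, pvCsplit, List.intercalate]
  | cons c r ih =>
    by_cases hc : c = ','
    · subst hc
      simp only [pvEmitTok, pvCsplit]
      rw [pv_emitTok_pending r false true, ih]
      simp
    · rw [pv_csplit_head_cons c r hc]
      simp only [pvEmitTok, if_neg hc]
      rw [pv_emitTok_pending r true false, ih]
      rcases hH : (pvCsplit [] r).headI with _ | ⟨d, H⟩
      · rcases pv_csplit_head_nil r hH with hr | hr
        · subst hr; simp [pvCsplit, List.intercalate, pvHasChar]
        · rw [pv_hasChar_filter]
          rcases hF : ((pvCsplit [] r).tail.filter (fun v => v ≠ [])) with _ | ⟨x, xs⟩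
          · have hthis : ((pvCsplit [] r).filter (fun v => v ≠ [])) = [] := by
              rcases hne : pvCsplit [] r with _ | ⟨h0, t0⟩
              · exact absurd hne (pv_csplit_ne r)
              · simp [hne] at hH hF; simp [hH]; exact hF
            have hF' : List.filter (fun v => !decide (v = [])) (pvCsplit [] r).tail = [] := by
              simpa using hF
            rw [hthis]
            simp [hr, hF', List.intercalate]
          · have hthis : ((pvCsplit [] r).filter (fun v => v ≠ [])) = x :: xs := by
              rcases hne : pvCsplit [] r with _ | ⟨h0, t0⟩
              · exact absurd hne (pv_csplit_ne r)
              · simp [hne] at hH hF; simp [hH, hF]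
            have hF' : List.filter (fun v => !decide (v = [])) (pvCsplit [] r).tail = x :: xs := by
              simpa using hF
            rw [hthis]
            simp [pv_intercalate_dash, hr, hF', pvStar]
      · have hcs : ((pvCsplit [] r).filter (fun v => v ≠ [])) = (d :: H) :: (pvCsplit [] r).tail.filter (fun v => v ≠ []) := by
          rcases hne : pvCsplit [] r with _ | ⟨h0, t0⟩
          · exact absurd hne (pv_csplit_ne r)
          · simp [hne] at hH; simp [hH]
        have hhc : pvHeadComma r = false := by
          rcases r with _ | ⟨e, r'⟩
          · rfl
          · by_cases he : e = ','
            · subst he; simp [pvCsplit] at hH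
            · rw [pv_csplit_head_cons e r' he] at hH; simp [pvHeadComma, he]
        rw [hcs]
        simp [pv_intercalate_dash, hhc]

theorem pv_foldl_fsm (cs : List Char) : ∀ out seen inTok piece pending,
    (cs.foldl pvStep (out, seen, inTok, piece, pending)).1
      = out ++ pvFsm seen inTok piece pending cs := by
  induction cs with
  | nil => intro out seen inTok piece pending; simp [pvFsm]
  | cons c r ih =>
    intro out seen inTok piece pending
    simp only [List.foldl_cons, pvStep, pvFsm]
    split_ifs with h1 h2 <;> simp [ih]

-- skip mode ignores piece/pending
theorem pv_fsm_skip_indep (cs : List Char) : ∀ seen p q p' q',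
    pvFsm seen false p q cs = pvFsm seen false p' q' cs := by
  induction cs with
  | nil => intros; rfl
  | cons c r ih =>
    intro seen p q p' q'
    simp only [pvFsm]
    by_cases hs : PySem.Chars.isspace c
    · simp [hs, ih seen p q p' q']
    · by_cases hc : c = ',' <;> simp [hs, hc, ih seen p q p' q']

-- token mode: emit the current token, then continue in skip mode
theorem pv_fsm_tok (cs : List Char) : ∀ seen p q,
    pvFsm seen true p q cs =
      pvEmitTok p q (cs.takeWhile (fun c => !PySem.Chars.isspace c))
        ++ pvFsm seen false false false (cs.dropWhile (fun c => !PySem.Chars.isspace c)) := by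
  induction cs with
  | nil => intro seen p q; simp [pvFsm, pvEmitTok]
  | cons c r ih =>
    intro seen p q
    by_cases hs : PySem.Chars.isspace c
    · simp only [pvFsm, List.takeWhile, List.dropWhile, hs]
      simp [pvEmitTok, pvFsm, hs, pv_fsm_skip_indep r seen p q false false]
    · simp only [pvFsm, List.takeWhile, List.dropWhile, hs]
      by_cases hc : c = ','
      · subst hc; simp [pvEmitTok, ih]
      · simp [pvEmitTok, hc, ih, pvStar]

-- wsplit with a nonempty current token: close it at the next whitespace
theorem pv_wsplit_tok (r : List Char) : ∀ cur, cur ≠ [] →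
    pvWsplit cur r =
      (cur.reverse ++ r.takeWhile (fun c => !PySem.Chars.isspace c))
        :: pvWsplit [] (r.dropWhile (fun c => !PySem.Chars.isspace c)) := by
  induction r with
  | nil => intro cur h; simp [pvWsplit, List.isEmpty_iff, h]
  | cons c r ih =>
    intro cur h
    by_cases hs : PySem.Chars.isspace c
    · simp [pvWsplit, hs, List.isEmpty_iff, h, List.takeWhile, List.dropWhile]
    · simp only [pvWsplit, List.takeWhile, List.dropWhile, hs]
      rw [ih (c :: cur) (by simp)]
      simp

-- main loop invariant: skip mode = join of the remaining whitespace-tokens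
theorem pv_fsm_skip (n : Nat) : ∀ cs : List Char, cs.length ≤ n → ∀ seen p q,
    pvFsm seen false p q cs = pvJt seen (pvWsplit [] cs) := by
  induction n with
  | zero =>
    intro cs h seen p q
    have : cs = [] := List.eq_nil_of_length_eq_zero (Nat.le_zero.mp h)
    subst this; simp [pvFsm, pvWsplit, pvJt]
  | succ n ih =>
    intro cs h seen p q
    match cs with
    | [] => simp [pvFsm, pvWsplit, pvJt]
    | c :: r =>
      by_cases hs : PySem.Chars.isspace c
      · simp only [pvFsm, if_pos hs, pvWsplit]
        simp only [List.isEmpty_nil]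
        exact ih r (by simpa using Nat.le_of_succ_le_succ h) seen p q
      · have hw : pvWsplit [] (c :: r) =
            (c :: r.takeWhile (fun c => !PySem.Chars.isspace c))
              :: pvWsplit [] (r.dropWhile (fun c => !PySem.Chars.isspace c)) := by
          simp only [pvWsplit, if_neg hs, List.isEmpty_nil]
          rw [pv_wsplit_tok r [c] (by simp)]
          simp
        have hd : (r.dropWhile (fun c => !PySem.Chars.isspace c)).length ≤ n := by
          have := List.length_dropWhile_le (fun c => !PySem.Chars.isspace c) r
          simp at h; omega
        by_cases hc : c = ','
        · subst hc
          simp only [pvFsm, if_neg hs, Bool.not_false, if_true]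
          rw [pv_fsm_tok, ih _ hd true]
          rw [hw]
          simp [pvJt, pvEmitTok]
        · simp only [pvFsm, if_neg hs, if_neg hc, Bool.not_false, if_true]
          rw [pv_fsm_tok, ih _ hd true]
          rw [hw]
          simp [pvJt, pvEmitTok, hc, pvStar]

-- star-map of the '_'-join of A's transformed tokens = pvJt false
theorem pv_core_tcomp (t : List Char) : (pvTcompA t).map pvStar = pvEmitTok false false t := by
  rw [pv_core_eq t]
  simp [pvTcompA, PySem.Chars.join, pv_splitOn_eq]

theorem pv_jt_true (ts : List (List Char)) :
    pvJt true ts = ts.flatMap (fun t => '_' :: pvEmitTok false false t) := by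
  induction ts with
  | nil => simp [pvJt]
  | cons t ts ih => simp [pvJt, ih]

theorem pv_jt_eq (parts : List (List Char)) :
    pvJt false parts = (PySem.Chars.join ['_'] (parts.map pvTcompA)).map pvStar := by
  cases parts with
  | nil => simp [pvJt, PySem.Chars.join, List.intercalate]
  | cons t ts =>
    have hus : pvStar '_' = '_' := rfl
    simp only [pvJt, PySem.Chars.join, List.map_cons]
    rw [pv_intercalate_us]
    simp [pv_jt_true, pv_core_tcomp, hus, List.map_flatMap, List.flatMap_map]

-- ===== VERDICT (by name: the statement is the Claim_ definition above) =====
theorem transform_cron_expression_spec : Claim_equal_transform_cron_expression := by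
  intro cron_expr _
  unfold Spec_transform_cron_expression
  simp only [transform_cron_expression, transform_cron_expression_alt]
  rw [pv_foldl_fsm]
  rw [pv_fsm_skip cron_expr.toList.length cron_expr.toList (le_refl _) false false false]
  rw [pv_replace_eq, pv_split₀_eq, pv_jt_eq]
  simp
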